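-- pv_equiv track=rewrite | github.com/otheobaldo/algoritmoslista5 | algoritmoslista6/FRM-Alg-06-Ex-08.py | soPalavras
-- ===== SOURCE A (Python) =====
-- def soPalavras(frase):
--     l1 = [".", ",", "!", "?", ":", ";", "(", ")", "-", "_"]
--     nfrase = ""
--     for caracter in frase:
--         if caracter in l1:
--             caracter = ""
--         nfrase = nfrase + caracter
--     lpalavras = nfrase.split(" ")
--     return lpalavras
-- ===== SOURCE B (Python) =====
-- def soPalavras(frase):
--     l1 = [".", ",", "!", "?", ":", ";", "(", ")", "-", "_"]
--     lpalavras = frase.split(" ")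
--     return ["".join(c for c in palavra if c not in l1) for palavra in lpalavras]
-- ===== Notes on version B (the rewrite author's own statement) =====
-- stated objective: alternative
-- what changed: A strips the punctuation characters from the whole string first and then splits once; B splits first and then cleans each resulting word with a join-of-kept-characters comprehension (the two phases are reversed, and the word boundaries are unaffected by the removed characters).
import Mathlib
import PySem

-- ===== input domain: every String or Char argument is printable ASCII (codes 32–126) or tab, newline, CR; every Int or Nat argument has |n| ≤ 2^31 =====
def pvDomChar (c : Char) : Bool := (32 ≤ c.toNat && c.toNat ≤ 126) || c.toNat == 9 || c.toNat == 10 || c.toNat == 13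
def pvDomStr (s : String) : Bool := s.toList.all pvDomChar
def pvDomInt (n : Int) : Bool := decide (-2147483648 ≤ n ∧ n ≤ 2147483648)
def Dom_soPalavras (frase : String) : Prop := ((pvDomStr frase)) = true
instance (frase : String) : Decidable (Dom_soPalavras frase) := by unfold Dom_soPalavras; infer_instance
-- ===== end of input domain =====

-- B reverses A's two phases: A strips punctuation from the whole string then splits on " ";
-- B splits on " " first and cleans each word (objective: alternative decomposition).

-- ===== PORT A =====
-- strings are ported as their List Char contents; the loop 'nfrase = nfrase + caracter'
-- (caracter set to "" on punctuation) is the foldl appending [] or [c]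
def soPalavras (frase : String) : List String :=
  let l1 : List Char := ['.', ',', '!', '?', ':', ';', '(', ')', '-', '_']
  let nfrase : List Char :=
    frase.toList.foldl (fun acc c => acc ++ (if l1.contains c then [] else [c])) []
  (PySem.Chars.splitOn nfrase [' ']).map String.mk

-- ===== PORT B =====
def soPalavras_alt (frase : String) : List String :=
  let l1 : List Char := ['.', ',', '!', '?', ':', ';', '(', ')', '-', '_']
  -- ''.join(c for c in palavra if c not in l1), ported as join of kept singleton chars
  (PySem.Chars.splitOn frase.toList [' ']).map
    (fun palavra =>
      String.mk (PySem.Chars.join [] ((palavra.filter (fun c => !l1.contains c)).map (fun c => [c]))))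

-- ===== PRECONDITION & SPEC =====
def Spec_soPalavras (frase : String) (out : List String) : Prop := out = soPalavras_alt frase
instance (frase : String) (out : List String) : Decidable (Spec_soPalavras frase out) := by unfold Spec_soPalavras; infer_instance

-- ===== CLAIM (what is proved, stated in full; the proofs are below) =====
def Claim_equal_soPalavras : Prop := ∀ (frase : String), Dom_soPalavras frase → Spec_soPalavras frase (soPalavras frase)

-- ===== LEMMAS AND PROOFS =====

-- A's accumulation loop is a filter
theorem pv_foldl_filter (q : Char → Bool) (cs : List Char) (acc : List Char) :
    cs.foldl (fun a c => a ++ (if q c then [] else [c])) acc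
      = acc ++ cs.filter (fun c => !q c) := by
  induction cs generalizing acc with
  | nil => simp
  | cons c rest ih =>
    by_cases h : q c = true <;> simp [List.foldl_cons, ih, h]

-- a simple structural characterisation of splitOn on the single-char separator " "
def pvSp : List Char → List (List Char)
  | [] => [[]]
  | c :: rest => if c = ' ' then [] :: pvSp rest else (pvSp rest).modifyHead (c :: ·)

theorem pvSp_ne_nil (cs : List Char) : pvSp cs ≠ [] := by
  cases cs with
  | nil => simp [pvSp]
  | cons c rest =>
    simp only [pvSp]
    split
    · simp
    · have := pvSp_ne_nil rest
      cases h : pvSp rest with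
      | nil => exact absurd h this
      | cons x xs => simp [h, List.modifyHead]

theorem pv_go_eq (fuel : Nat) (l cur : List Char) (acc : List (List Char))
    (h : l.length ≤ fuel) :
    PySem.Chars.splitOn.go [' '] fuel l cur acc
      = acc.reverse ++ (pvSp l).modifyHead (cur.reverse ++ ·) := by
  induction fuel generalizing l cur acc with
  | zero =>
    have : l = [] := by simpa using List.length_eq_zero_iff.mp (Nat.le_zero.mp h)
    subst this
    simp [PySem.Chars.splitOn.go, pvSp]
  | succ f ih =>
    cases l with
    | nil => simp [PySem.Chars.splitOn.go, pvSp]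
    | cons c rest =>
      have hr : rest.length ≤ f := by simpa using h
      by_cases hc : c = ' '
      · subst hc
        have hp : [' '].isPrefixOf (' ' :: rest) = true := by simp [List.isPrefixOf]
        simp only [PySem.Chars.splitOn.go, hp, if_true, List.length_singleton,
          List.drop_succ_cons, List.drop_zero]
        rw [ih _ _ _ hr]
        cases h' : pvSp rest with
        | nil => exact absurd h' (pvSp_ne_nil rest)
        | cons x xs => simp [pvSp, h', List.modifyHead]
      · have hp : [' '].isPrefixOf (c :: rest) = false := by
          simp [List.isPrefixOf]
          exact fun h' => hc h'.symm
        simp only [PySem.Chars.splitOn.go, hp, Bool.false_eq_true, if_false]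
        rw [ih _ _ _ hr]
        cases h' : pvSp rest with
        | nil => exact absurd h' (pvSp_ne_nil rest)
        | cons x xs => simp [pvSp, h', hc, List.modifyHead]

theorem pv_splitOn_eq (cs : List Char) :
    PySem.Chars.splitOn cs [' '] = pvSp cs := by
  unfold PySem.Chars.splitOn
  rw [pv_go_eq cs.length.succ cs [] [] (Nat.le_succ _)]
  obtain ⟨x, xs, hx⟩ := List.exists_cons_of_ne_nil (pvSp_ne_nil cs)
  simp [hx, List.modifyHead]

-- splitting on " " commutes with a filter that keeps ' '
theorem pvSp_filter (p : Char → Bool) (hp : p ' ' = true) (cs : List Char) :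
    pvSp (cs.filter p) = (pvSp cs).map (·.filter p) := by
  induction cs with
  | nil => simp [pvSp]
  | cons c rest ih =>
    by_cases hc : c = ' '
    · subst hc
      simp [hp, pvSp, ih]
    · by_cases hpc : p c = true
      · obtain ⟨x, xs, hx⟩ := List.exists_cons_of_ne_nil (pvSp_ne_nil rest)
        simp [pvSp, hc, hpc, ih, hx, List.modifyHead]
      · obtain ⟨x, xs, hx⟩ := List.exists_cons_of_ne_nil (pvSp_ne_nil rest)
        simp [pvSp, hc, hpc, ih, hx, List.modifyHead]

-- ===== VERDICT (by name: the statement is the Claim_ definition above) =====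
theorem soPalavras_spec : Claim_equal_soPalavras := by
  intro frase _
  unfold Spec_soPalavras soPalavras soPalavras_alt
  simp only [pv_foldl_filter, List.nil_append, pv_splitOn_eq,
    PySem.Chars.join_nil_singletons]
  rw [pvSp_filter (fun c => !(['.', ',', '!', '?', ':', ';', '(', ')', '-', '_'].contains c))
    (by decide)]
  simp
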